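-- pv_equiv track=rewrite | github.com/divyalekha99/python-label-refinement | distance_metrics.py | _get_multiset_distance_for_strings
-- ===== SOURCE A (Python) =====
-- def _get_multiset_distance_for_strings(string_a, string_b) -> int:
--     distance = 0
--     if len(string_a) > len(string_b):
--         long_sting = string_a
--         short_string = string_b
--     else:
--         long_sting = string_b
--         short_string = string_a
--
--     for label in long_sting:
--         if label not in short_string:
--             distance += 1
--         else:
--             short_string = short_string.replace(label, '', 1)
--
--     return distance
-- ===== SOURCE B (Python) =====
-- def _get_multiset_distance_for_strings(string_a, string_b) -> int:
--     sa = sorted(string_a)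
--     sb = sorted(string_b)
--     i = j = overlap = 0
--     while i < len(sa) and j < len(sb):
--         if sa[i] == sb[j]:
--             overlap += 1
--             i += 1
--             j += 1
--         elif sa[i] < sb[j]:
--             i += 1
--         else:
--             j += 1
--     return max(len(string_a), len(string_b)) - overlap
-- ===== Notes on version B (the rewrite author's own statement) =====
-- stated objective: faster
-- what changed: Replaces the membership-test-and-replace scan over the longer string (each step rescanning the shrinking shorter string) by sorting both strings once and counting the multiset overlap in a single two-pointer merge, returning max(len_a,len_b) - overlap.
import Mathlib
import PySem

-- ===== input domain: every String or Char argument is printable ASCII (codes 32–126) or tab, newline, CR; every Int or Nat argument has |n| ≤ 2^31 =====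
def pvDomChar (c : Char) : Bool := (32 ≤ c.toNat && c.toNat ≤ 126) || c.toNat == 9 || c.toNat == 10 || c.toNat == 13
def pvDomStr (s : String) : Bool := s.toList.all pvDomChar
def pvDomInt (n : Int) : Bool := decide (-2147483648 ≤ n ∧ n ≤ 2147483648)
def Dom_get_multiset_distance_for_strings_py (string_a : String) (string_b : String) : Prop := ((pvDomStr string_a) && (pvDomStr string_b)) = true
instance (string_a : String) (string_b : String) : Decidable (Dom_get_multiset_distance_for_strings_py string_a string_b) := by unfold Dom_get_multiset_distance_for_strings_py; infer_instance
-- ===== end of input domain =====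

-- B sorts both strings once and counts the multiset overlap in one two-pointer
-- merge instead of A's scan-and-replace over the longer string: a different,
-- asymptotically faster algorithm with the same return value on every input.

-- ===== PORT A =====
-- the loop body: `label not in short_string` on a 1-char label is membership;
-- `short_string.replace(label, '', 1)` removes the first occurrence of that
-- char, which is exactly List.erase on the char list (ported by hand, exact).
def get_multiset_distance_for_strings_py (string_a : String) (string_b : String) : Int :=
  let p : List Char × List Char :=
    if string_a.toList.length > string_b.toList.length
    then (string_a.toList, string_b.toList)
    else (string_b.toList, string_a.toList)
  (p.1.foldl
    (fun (st : Int × List Char) label =>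
      if label ∉ st.2 then (st.1 + 1, st.2) else (st.1, st.2.erase label))
    (0, p.2)).1

-- ===== PORT B =====
-- the while loop of Source B: advance the smaller head, count equal heads
def pvMergeCount : List Char → List Char → Nat
  | [], _ => 0
  | _ :: _, [] => 0
  | a :: x, b :: y =>
    if a = b then pvMergeCount x y + 1
    else if a < b then pvMergeCount x (b :: y)
    else pvMergeCount (a :: x) y

def get_multiset_distance_for_strings_py_alt (string_a : String) (string_b : String) : Int :=
  let sa := PySem.List.sorted string_a.toList (fun c => c) false
  let sb := PySem.List.sorted string_b.toList (fun c => c) false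
  (max string_a.toList.length string_b.toList.length : Int) - pvMergeCount sa sb

-- ===== PRECONDITION & SPEC =====
def Spec_get_multiset_distance_for_strings_py (string_a : String) (string_b : String) (out : Int) : Prop := out = get_multiset_distance_for_strings_py_alt string_a string_b
instance (string_a : String) (string_b : String) (out : Int) : Decidable (Spec_get_multiset_distance_for_strings_py string_a string_b out) := by unfold Spec_get_multiset_distance_for_strings_py; infer_instance

-- ===== CLAIM (what is proved, stated in full; the proofs are below) =====
def Claim_equal_get_multiset_distance_for_strings_py : Prop := ∀ (string_a : String) (string_b : String), Dom_get_multiset_distance_for_strings_py string_a string_b → Spec_get_multiset_distance_for_strings_py string_a string_b (get_multiset_distance_for_strings_py string_a string_b)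

-- ===== LEMMAS AND PROOFS =====

-- A's loop computes length-of-long minus the multiset-intersection cardinality
theorem pv_aloop (l : List Char) : ∀ (s : List Char) (d : Int),
    (l.foldl
      (fun (st : Int × List Char) label =>
        if label ∉ st.2 then (st.1 + 1, st.2) else (st.1, st.2.erase label))
      (d, s)).1
    = d + l.length - (Multiset.card ((l : Multiset Char) ∩ (s : Multiset Char)) : Int) := by
  induction l with
  | nil => intro s d; simp
  | cons c l ih =>
    intro s d
    by_cases hc : c ∈ s
    · have h1 : ((c :: l : List Char) : Multiset Char) ∩ (s : Multiset Char)
          = c ::ₘ ((l : Multiset Char) ∩ ((s.erase c : List Char) : Multiset Char)) := by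
        simpa [Multiset.coe_erase] using
          (Multiset.cons_inter_of_pos (s := (l : Multiset Char)) (t := (s : Multiset Char)) (by simpa using hc))
      have hstep : List.foldl
            (fun (st : Int × List Char) label =>
              if label ∉ st.2 then (st.1 + 1, st.2) else (st.1, st.2.erase label))
            (d, s) (c :: l)
          = List.foldl
            (fun (st : Int × List Char) label =>
              if label ∉ st.2 then (st.1 + 1, st.2) else (st.1, st.2.erase label))
            (d, s.erase c) l := by
        simp [hc]
      rw [hstep, ih (s.erase c) d, h1]
      push_cast [Multiset.card_cons, List.length_cons]
      ring
    · have h1 : ((c :: l : List Char) : Multiset Char) ∩ (s : Multiset Char)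
          = (l : Multiset Char) ∩ (s : Multiset Char) := by
        exact Multiset.cons_inter_of_neg (s := (l : Multiset Char)) (t := (s : Multiset Char)) (by simpa using hc)
      have hstep : List.foldl
            (fun (st : Int × List Char) label =>
              if label ∉ st.2 then (st.1 + 1, st.2) else (st.1, st.2.erase label))
            (d, s) (c :: l)
          = List.foldl
            (fun (st : Int × List Char) label =>
              if label ∉ st.2 then (st.1 + 1, st.2) else (st.1, st.2.erase label))
            (d + 1, s) l := by
        simp [hc]
      rw [hstep, ih s (d + 1), h1]
      push_cast [List.length_cons]
      ring

-- the merge on two sorted lists counts the multiset-intersection cardinality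
theorem pv_merge (x : List Char) : ∀ (y : List Char),
    x.Pairwise (· ≤ ·) → y.Pairwise (· ≤ ·) →
    (pvMergeCount x y : Int)
      = Multiset.card ((x : Multiset Char) ∩ (y : Multiset Char)) := by
  induction x with
  | nil => intro y _ _; simp [pvMergeCount]
  | cons a x ihx =>
    intro y hx hy
    induction y with
    | nil => simp [pvMergeCount]
    | cons b y ihy =>
      rcases List.pairwise_cons.mp hx with ⟨hax, hx'⟩
      rcases List.pairwise_cons.mp hy with ⟨hby, hy'⟩
      by_cases hab : a = b
      · subst hab
        have h1 : ((a :: x : List Char) : Multiset Char) ∩ ((a :: y : List Char) : Multiset Char)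
            = a ::ₘ ((x : Multiset Char) ∩ ((y : List Char) : Multiset Char)) := by
          have := Multiset.cons_inter_of_pos (s := (x : Multiset Char))
            (t := ((a :: y : List Char) : Multiset Char)) (a := a) (by simp)
          simpa using this
        rw [show pvMergeCount (a :: x) (a :: y) = pvMergeCount x y + 1 from by
              simp [pvMergeCount]]
        rw [h1]
        push_cast [Multiset.card_cons, ← ihx y hx' hy']
        ring
      · by_cases hlt : a < b
        · have hnot : a ∉ ((b :: y : List Char) : Multiset Char) := by
            simp only [Multiset.mem_coe, List.mem_cons]
            rintro (rfl | h)
            · exact hab rfl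
            · exact absurd (hby a h) (not_le.mpr hlt)
          have h1 : ((a :: x : List Char) : Multiset Char) ∩ ((b :: y : List Char) : Multiset Char)
              = (x : Multiset Char) ∩ ((b :: y : List Char) : Multiset Char) :=
            Multiset.cons_inter_of_neg (s := (x : Multiset Char)) hnot
          rw [h1, ← ihx (b :: y) hx' hy]
          simp [pvMergeCount, hab, hlt]
        · have hba : b < a := lt_of_le_of_ne (not_lt.mp hlt) (fun h => hab h.symm)
          have hnot : b ∉ ((a :: x : List Char) : Multiset Char) := by
            simp only [Multiset.mem_coe, List.mem_cons]
            rintro (rfl | h)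
            · exact hab rfl
            · exact absurd (hax b h) (not_le.mpr hba)
          have h1 : ((a :: x : List Char) : Multiset Char) ∩ ((b :: y : List Char) : Multiset Char)
              = ((a :: x : List Char) : Multiset Char) ∩ ((y : List Char) : Multiset Char) := by
            rw [Multiset.inter_comm (((a :: x : List Char)) : Multiset Char)
                  (((b :: y : List Char)) : Multiset Char),
                Multiset.inter_comm (((a :: x : List Char)) : Multiset Char)
                  ((y : List Char) : Multiset Char)]
            exact Multiset.cons_inter_of_neg (s := (y : Multiset Char)) hnot
          rw [h1, ← ihy hy']
          simp [pvMergeCount, hab, hlt]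

theorem pv_sorted_coe (l : List Char) :
    ((PySem.List.sorted l (fun c => c) false : List Char) : Multiset Char) = (l : Multiset Char) :=
  Multiset.coe_eq_coe.mpr (PySem.List.sorted_perm l (fun c => c) false)

-- B equals max(len_a,len_b) minus the intersection cardinality
theorem pv_alt_eq (a b : String) :
    get_multiset_distance_for_strings_py_alt a b
      = (max a.toList.length b.toList.length : Int)
        - Multiset.card ((a.toList : Multiset Char) ∩ (b.toList : Multiset Char)) := by
  have hx := PySem.List.sorted_pairwise (xs := a.toList) (key := fun c => c)
  have hy := PySem.List.sorted_pairwise (xs := b.toList) (key := fun c => c)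
  have e : get_multiset_distance_for_strings_py_alt a b
      = (max (a.toList.length : Int) (b.toList.length : Int))
        - (pvMergeCount (PySem.List.sorted a.toList (fun c => c) false)
            (PySem.List.sorted b.toList (fun c => c) false) : Int) := rfl
  rw [e, pv_merge _ _ hx hy, pv_sorted_coe, pv_sorted_coe]

-- ===== VERDICT (by name: the statement is the Claim_ definition above) =====
theorem get_multiset_distance_for_strings_py_spec : Claim_equal_get_multiset_distance_for_strings_py := by
  intro a b _
  show get_multiset_distance_for_strings_py a b = get_multiset_distance_for_strings_py_alt a b
  rw [pv_alt_eq]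
  by_cases h : a.toList.length > b.toList.length
  · have e1 : get_multiset_distance_for_strings_py a b
        = (a.toList.foldl
            (fun (st : Int × List Char) label =>
              if label ∉ st.2 then (st.1 + 1, st.2) else (st.1, st.2.erase label))
            (0, b.toList)).1 := by
      unfold get_multiset_distance_for_strings_py
      rw [if_pos h]
    rw [e1, pv_aloop, max_eq_left (by exact_mod_cast Nat.le_of_lt h)]
    ring
  · have e1 : get_multiset_distance_for_strings_py a b
        = (b.toList.foldl
            (fun (st : Int × List Char) label =>
              if label ∉ st.2 then (st.1 + 1, st.2) else (st.1, st.2.erase label))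
            (0, a.toList)).1 := by
      unfold get_multiset_distance_for_strings_py
      rw [if_neg h]
    rw [e1, pv_aloop, Multiset.inter_comm,
        max_eq_right (by exact_mod_cast Nat.le_of_not_lt h)]
    ring
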